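-- pv_equiv track=rewrite | github.com/iteam1/SelectN | src/selectn/core/feature_extraction.py | _preprocess_for_syntax
-- ===== SOURCE A (Python) =====
-- from typing import List, Dict, Any, Optional, Union
--
-- def _preprocess_for_syntax(documents: List[str]) -> List[str]:
--     """
--     Preprocess documents to highlight syntactic structures.
--
--     Args:
--         documents: The documents to preprocess.
--
--     Returns:
--         List of preprocessed documents.
--     """
--     processed = []
--     for doc in documents:
--         # Add special markers for syntax elements common in code and grammars
--         doc = doc.replace('{', ' OPEN_BRACE ')
--         doc = doc.replace('}', ' CLOSE_BRACE ')
--         doc = doc.replace('[', ' OPEN_BRACKET ')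
--         doc = doc.replace(']', ' CLOSE_BRACKET ')
--         doc = doc.replace('(', ' OPEN_PAREN ')
--         doc = doc.replace(')', ' CLOSE_PAREN ')
--         doc = doc.replace(';', ' SEMICOLON ')
--         doc = doc.replace(':', ' COLON ')
--         doc = doc.replace('.', ' DOT ')
--         doc = doc.replace('=', ' EQUALS ')
--         processed.append(doc)
--     return processed
-- ===== SOURCE B (Python) =====
-- _SYNTAX_TOKENS = {
--     '{': ' OPEN_BRACE ',
--     '}': ' CLOSE_BRACE ',
--     '[': ' OPEN_BRACKET ',
--     ']': ' CLOSE_BRACKET ',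
--     '(': ' OPEN_PAREN ',
--     ')': ' CLOSE_PAREN ',
--     ';': ' SEMICOLON ',
--     ':': ' COLON ',
--     '.': ' DOT ',
--     '=': ' EQUALS ',
-- }
--
-- def _preprocess_for_syntax(documents):
--     return ["".join(_SYNTAX_TOKENS.get(c, c) for c in doc) for doc in documents]
-- ===== Notes on version B (the rewrite author's own statement) =====
-- stated objective: idiomatic
-- what changed: Replaces ten sequential str.replace passes per document by a single pass that maps each character through one precomputed token dictionary and joins the pieces.
import Mathlib
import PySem

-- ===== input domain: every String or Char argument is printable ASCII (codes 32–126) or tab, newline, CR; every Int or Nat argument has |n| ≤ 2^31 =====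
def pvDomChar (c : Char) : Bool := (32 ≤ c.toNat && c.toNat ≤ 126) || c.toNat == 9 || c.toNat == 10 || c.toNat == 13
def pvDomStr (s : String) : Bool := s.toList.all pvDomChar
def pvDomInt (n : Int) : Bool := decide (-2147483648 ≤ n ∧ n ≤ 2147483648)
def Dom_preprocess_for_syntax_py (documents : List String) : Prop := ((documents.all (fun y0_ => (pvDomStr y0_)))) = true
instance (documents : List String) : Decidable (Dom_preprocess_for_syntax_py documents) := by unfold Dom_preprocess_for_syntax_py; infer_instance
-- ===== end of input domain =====

-- B replaces A's ten sequential .replace passes per document by a single per-character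
-- dict-lookup pass (idiomatic table-driven rewrite); equivalence is total — no Pre_ needed.

-- ===== PORT A =====
def preprocess_for_syntax_py (documents : List String) : List String :=
  documents.foldl (fun processed doc =>
    let doc := PySem.Str.replace doc "{" " OPEN_BRACE "
    let doc := PySem.Str.replace doc "}" " CLOSE_BRACE "
    let doc := PySem.Str.replace doc "[" " OPEN_BRACKET "
    let doc := PySem.Str.replace doc "]" " CLOSE_BRACKET "
    let doc := PySem.Str.replace doc "(" " OPEN_PAREN "
    let doc := PySem.Str.replace doc ")" " CLOSE_PAREN "
    let doc := PySem.Str.replace doc ";" " SEMICOLON "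
    let doc := PySem.Str.replace doc ":" " COLON "
    let doc := PySem.Str.replace doc "." " DOT "
    let doc := PySem.Str.replace doc "=" " EQUALS "
    processed ++ [doc]) []

-- ===== PORT B =====
def pvSyntaxTokens : PySem.Dict Char String :=
  ((((((((((PySem.Dict.empty.insert '{' " OPEN_BRACE ").insert '}' " CLOSE_BRACE ").insert
    '[' " OPEN_BRACKET ").insert ']' " CLOSE_BRACKET ").insert '(' " OPEN_PAREN ").insert
    ')' " CLOSE_PAREN ").insert ';' " SEMICOLON ").insert ':' " COLON ").insert
    '.' " DOT ").insert '=' " EQUALS ")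

def preprocess_for_syntax_py_alt (documents : List String) : List String :=
  documents.map (fun doc =>
    PySem.Str.join "" (doc.toList.map (fun c =>
      PySem.Dict.getD pvSyntaxTokens c (String.ofList [c]))))

-- ===== PRECONDITION & SPEC =====
def Spec_preprocess_for_syntax_py (documents : List String) (out : List String) : Prop := out = preprocess_for_syntax_py_alt documents
instance (documents : List String) (out : List String) : Decidable (Spec_preprocess_for_syntax_py documents out) := by unfold Spec_preprocess_for_syntax_py; infer_instance

-- ===== CLAIM (what is proved, stated in full; the proofs are below) =====
def Claim_equal_preprocess_for_syntax_py : Prop := ∀ (documents : List String), Dom_preprocess_for_syntax_py documents → Spec_preprocess_for_syntax_py documents (preprocess_for_syntax_py documents)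

-- ===== LEMMAS AND PROOFS =====

-- s.replace(old, new) for a SINGLE-character old is a one-pass per-character substitution.
theorem pvGoSingle (c0 : Char) (nw : List Char) :
    ∀ (s : List Char) (fuel : Nat) (acc : List Char), s.length ≤ fuel →
    PySem.Chars.replace.go [c0] nw fuel s acc
      = acc.reverse ++ s.flatMap (fun c => if c = c0 then nw else [c])
  | [], 0, acc, _ => by simp [PySem.Chars.replace.go]
  | [], _+1, acc, _ => by simp [PySem.Chars.replace.go]
  | c :: t, fuel+1, acc, h => by
    have ht : t.length ≤ fuel := by simpa using h
    by_cases hc : c = c0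
    · simp [PySem.Chars.replace.go, List.isPrefixOf, hc, pvGoSingle c0 nw t fuel _ ht]
    · simp [PySem.Chars.replace.go, List.isPrefixOf, hc, Ne.symm hc, pvGoSingle c0 nw t fuel _ ht]

theorem pvReplaceSingle (c0 : Char) (nw : List Char) (s : List Char) :
    PySem.Chars.replace s [c0] nw = s.flatMap (fun c => if c = c0 then nw else [c]) := by
  simp [PySem.Chars.replace, pvGoSingle c0 nw s s.length [] (le_refl _)]

-- shorthand for the per-character substitution a single replace performs
def pvSub (c0 : Char) (nw : List Char) (c : Char) : List Char := if c = c0 then nw else [c]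

-- the per-character function B's port computes (as a character list)
def pvAltChar (c : Char) : List Char :=
  (PySem.Dict.getD pvSyntaxTokens c (String.ofList [c])).toList

-- A's ten chained substitutions, composed, agree with B's table lookup on EVERY character.
theorem pvCharEq (c : Char) :
    List.flatMap (fun x =>
      List.flatMap (fun x =>
        List.flatMap (fun x =>
          List.flatMap (fun x =>
            List.flatMap (fun x =>
              List.flatMap (fun x =>
                List.flatMap (fun x =>
                  List.flatMap (fun x =>
                    List.flatMap (pvSub '=' " EQUALS ".toList)
                      (pvSub '.' " DOT ".toList x))
                    (pvSub ':' " COLON ".toList x))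
                  (pvSub ';' " SEMICOLON ".toList x))
                (pvSub ')' " CLOSE_PAREN ".toList x))
              (pvSub '(' " OPEN_PAREN ".toList x))
            (pvSub ']' " CLOSE_BRACKET ".toList x))
          (pvSub '[' " OPEN_BRACKET ".toList x))
        (pvSub '}' " CLOSE_BRACE ".toList x))
      (pvSub '{' " OPEN_BRACE ".toList c)
    = pvAltChar c := by
  by_cases h1 : c = '{'; · subst h1; rfl
  by_cases h2 : c = '}'; · subst h2; rfl
  by_cases h3 : c = '['; · subst h3; rfl
  by_cases h4 : c = ']'; · subst h4; rfl
  by_cases h5 : c = '('; · subst h5; rfl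
  by_cases h6 : c = ')'; · subst h6; rfl
  by_cases h7 : c = ';'; · subst h7; rfl
  by_cases h8 : c = ':'; · subst h8; rfl
  by_cases h9 : c = '.'; · subst h9; rfl
  by_cases h10 : c = '='; · subst h10; rfl
  simp [pvSub, pvAltChar, pvSyntaxTokens, PySem.Dict.getD_insert, PySem.Dict.getD_empty,
        h1, h2, h3, h4, h5, h6, h7, h8, h9, h10]

theorem pvJoinNil (cs : List (List Char)) : PySem.Chars.join [] cs = cs.flatten := by
  simp [PySem.Chars.join, List.intercalate]
  induction cs with
  | nil => rfl
  | cons h t ih => cases t <;> simp_all [List.intersperse]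

-- per-document equality
set_option maxHeartbeats 1000000 in
theorem pvDocEq (doc : String) :
    (PySem.Str.replace (PySem.Str.replace (PySem.Str.replace (PySem.Str.replace
      (PySem.Str.replace (PySem.Str.replace (PySem.Str.replace (PySem.Str.replace
      (PySem.Str.replace (PySem.Str.replace doc "{" " OPEN_BRACE ") "}" " CLOSE_BRACE ")
      "[" " OPEN_BRACKET ") "]" " CLOSE_BRACKET ") "(" " OPEN_PAREN ") ")" " CLOSE_PAREN ")
      ";" " SEMICOLON ") ":" " COLON ") "." " DOT ") "=" " EQUALS ")
    = PySem.Str.join "" (doc.toList.map (fun c =>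
        PySem.Dict.getD pvSyntaxTokens c (String.ofList [c]))) := by
  simp only [PySem.Str.replace, PySem.Str.join, String.toList_ofList]
  apply congrArg String.ofList
  have hA : ∀ (s : List Char) (c0 : Char) (nw : List Char),
      PySem.Chars.replace s [c0] nw = s.flatMap (pvSub c0 nw) := fun s c0 nw =>
    pvReplaceSingle c0 nw s
  show PySem.Chars.replace _ "=".toList " EQUALS ".toList = _
  rw [show ("{" : String).toList = ['{'] from rfl, show ("}" : String).toList = ['}'] from rfl,
      show ("[" : String).toList = ['['] from rfl, show ("]" : String).toList = [']'] from rfl,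
      show ("(" : String).toList = ['('] from rfl, show (")" : String).toList = [')'] from rfl,
      show (";" : String).toList = [';'] from rfl, show (":" : String).toList = [':'] from rfl,
      show ("." : String).toList = ['.'] from rfl, show ("=" : String).toList = ['='] from rfl]
  rw [hA, hA, hA, hA, hA, hA, hA, hA, hA, hA]
  rw [List.flatMap_assoc, List.flatMap_assoc, List.flatMap_assoc, List.flatMap_assoc,
      List.flatMap_assoc, List.flatMap_assoc, List.flatMap_assoc, List.flatMap_assoc,
      List.flatMap_assoc]
  rw [show ("" : String).toList = ([] : List Char) from rfl, pvJoinNil, List.map_map,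
      ← List.flatMap_def]
  exact List.flatMap_congr (fun c _ => pvCharEq c)

-- ===== VERDICT (by name: the statement is the Claim_ definition above) =====
theorem preprocess_for_syntax_py_spec : Claim_equal_preprocess_for_syntax_py := by
  intro documents _
  unfold Spec_preprocess_for_syntax_py preprocess_for_syntax_py preprocess_for_syntax_py_alt
  rw [PySem.List.foldl_append_singleton_eq_map]
  exact List.map_congr_left (fun doc _ => pvDocEq doc)
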